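-- pv_equiv track=rewrite | github.com/kaluginpeter/Algorithms_and_structures_tasks | CodeWars/6kyu/Count_the_photos!.py | count_photos
-- ===== SOURCE A (Python) =====
-- def count_photos(road):
--     c, l, f = 0, 0, 0
--     for i in road:
--         if i == ">": l += 1
--         elif i == ".":
--             c += l
--             f += 1
--         elif i == "<": c += f
--     return c
-- ===== SOURCE B (Python) =====
-- def count_photos(road):
--     # The answer is the number of ordered pairs ('>' before '.') plus ('.' before '<').
--     # Count each pair type with its own backward pass over the road.
--     total = 0
--     seen = 0
--     for ch in reversed(road):
--         if ch == "<": seen += 1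
--         elif ch == ".": total += seen
--     seen = 0
--     for ch in reversed(road):
--         if ch == ".": seen += 1
--         elif ch == ">": total += seen
--     return total
-- ===== Notes on version B (the rewrite author's own statement) =====
-- stated objective: alternative
-- what changed: A is a single forward pass with three coupled accumulators (c,l,f); B counts the two pair types separately with two backward passes over reversed(road): one counting ('.','<') pairs, one counting ('>','.') pairs, each with a single seen-counter.
import Mathlib
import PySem

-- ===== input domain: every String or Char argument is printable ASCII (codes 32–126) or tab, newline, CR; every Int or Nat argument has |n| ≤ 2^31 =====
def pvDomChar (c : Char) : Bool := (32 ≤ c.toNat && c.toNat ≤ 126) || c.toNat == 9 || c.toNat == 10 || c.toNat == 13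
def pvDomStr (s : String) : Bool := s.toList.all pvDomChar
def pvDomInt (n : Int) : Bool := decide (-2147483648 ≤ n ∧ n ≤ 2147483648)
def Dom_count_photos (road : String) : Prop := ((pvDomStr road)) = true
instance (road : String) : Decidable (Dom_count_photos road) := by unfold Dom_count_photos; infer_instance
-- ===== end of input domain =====

-- B replaces A's single forward pass with three coupled accumulators by two backward
-- passes, each counting one pair type; same O(n) cost, alternative decomposition.

-- ===== PORT A =====
-- state (c, l, f) as in the Python, one forward pass
def count_photos (road : String) : Int :=
  (road.toList.foldl
    (fun (s : Int × Int × Int) i =>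
      if i = '>' then (s.1, s.2.1 + 1, s.2.2)
      else if i = '.' then (s.1 + s.2.1, s.2.1, s.2.2 + 1)
      else if i = '<' then (s.1 + s.2.2, s.2.1, s.2.2)
      else s)
    (0, 0, 0)).1

-- ===== PORT B =====
-- two passes over reversed(road), state (total, seen) in each
def count_photos_alt (road : String) : Int :=
  let p1 := road.toList.reverse.foldl
    (fun (s : Int × Int) ch =>
      if ch = '<' then (s.1, s.2 + 1)
      else if ch = '.' then (s.1 + s.2, s.2)
      else s) (0, 0)
  let p2 := road.toList.reverse.foldl
    (fun (s : Int × Int) ch =>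
      if ch = '.' then (s.1, s.2 + 1)
      else if ch = '>' then (s.1 + s.2, s.2)
      else s) (p1.1, 0)
  p2.1

-- ===== PRECONDITION & SPEC =====
def Spec_count_photos (road : String) (out : Int) : Prop := out = count_photos_alt road
instance (road : String) (out : Int) : Decidable (Spec_count_photos road out) := by unfold Spec_count_photos; infer_instance

-- ===== CLAIM (what is proved, stated in full; the proofs are below) =====
def Claim_equal_count_photos : Prop := ∀ (road : String), Dom_count_photos road → Spec_count_photos road (count_photos road)

-- ===== LEMMAS AND PROOFS =====

-- number of ('.', '<') ordered pairs in xs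
def pvQ1 : List Char → Int
  | [] => 0
  | a :: xs => (if a = '.' then (xs.count '<' : Int) else 0) + pvQ1 xs

-- number of ('>', '.') ordered pairs in xs
def pvQ2 : List Char → Int
  | [] => 0
  | a :: xs => (if a = '>' then (xs.count '.' : Int) else 0) + pvQ2 xs

-- A's fold from a generic state, in closed form
theorem pvA_fold (xs : List Char) : ∀ (c l f : Int),
    (xs.foldl
      (fun (s : Int × Int × Int) i =>
        if i = '>' then (s.1, s.2.1 + 1, s.2.2)
        else if i = '.' then (s.1 + s.2.1, s.2.1, s.2.2 + 1)
        else if i = '<' then (s.1 + s.2.2, s.2.1, s.2.2)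
        else s)
      (c, l, f)).1
    = c + l * (xs.count '.' : Int) + f * (xs.count '<' : Int) + pvQ1 xs + pvQ2 xs := by
  induction xs with
  | nil => intro c l f; simp [pvQ1, pvQ2]
  | cons a xs ih =>
    intro c l f
    by_cases h1 : a = '>'
    · subst h1
      simp only [List.foldl_cons, if_pos rfl]
      rw [ih]
      simp [pvQ1, pvQ2, List.count_cons]
      push_cast
      ring
    · by_cases h2 : a = '.'
      · subst h2
        simp only [List.foldl_cons, if_neg (by decide : ¬ (('.' : Char) = '>')), if_pos rfl]
        rw [ih]
        simp [pvQ1, pvQ2, List.count_cons]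
        push_cast
        ring
      · by_cases h3 : a = '<'
        · subst h3
          simp only [List.foldl_cons, if_neg (by decide : ¬ (('<' : Char) = '>')),
            if_neg (by decide : ¬ (('<' : Char) = '.')), if_pos rfl]
          rw [ih]
          simp [pvQ1, pvQ2, List.count_cons]
          push_cast
          ring
        · simp only [List.foldl_cons, if_neg h1, if_neg h2, if_neg h3]
          rw [ih]
          simp [pvQ1, pvQ2, List.count_cons, h1, h2, h3]

-- B's first pass (as a foldr, i.e. the foldl over the reversed list), in closed form
theorem pvB1_fold (xs : List Char) : ∀ (t s : Int),
    (xs.foldr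
      (fun ch (s : Int × Int) =>
        if ch = '<' then (s.1, s.2 + 1)
        else if ch = '.' then (s.1 + s.2, s.2)
        else s) (t, s))
    = (t + s * (xs.count '.' : Int) + pvQ1 xs, s + (xs.count '<' : Int)) := by
  induction xs with
  | nil => intro t s; simp [pvQ1]
  | cons a xs ih =>
    intro t s
    simp only [List.foldr_cons, ih]
    by_cases h3 : a = '<'
    · subst h3
      simp only [if_pos rfl, if_neg (by decide : ¬ (('<' : Char) = '.')), Prod.mk.injEq]
      simp [pvQ1, List.count_cons]
      push_cast
      ring
    · by_cases h2 : a = '.'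
      · subst h2
        simp only [if_neg (by decide : ¬ (('.' : Char) = '<')), if_pos rfl, Prod.mk.injEq]
        simp [pvQ1, List.count_cons]
        push_cast
        ring
      · simp only [if_neg h3, if_neg h2, Prod.mk.injEq]
        simp [pvQ1, List.count_cons, h2, h3]

-- B's second pass, in closed form
theorem pvB2_fold (xs : List Char) : ∀ (t s : Int),
    (xs.foldr
      (fun ch (s : Int × Int) =>
        if ch = '.' then (s.1, s.2 + 1)
        else if ch = '>' then (s.1 + s.2, s.2)
        else s) (t, s))
    = (t + s * (xs.count '>' : Int) + pvQ2 xs, s + (xs.count '.' : Int)) := by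
  induction xs with
  | nil => intro t s; simp [pvQ2]
  | cons a xs ih =>
    intro t s
    simp only [List.foldr_cons, ih]
    by_cases h2 : a = '.'
    · subst h2
      simp only [if_pos rfl, if_neg (by decide : ¬ (('.' : Char) = '>')), Prod.mk.injEq]
      simp [pvQ2, List.count_cons]
      push_cast
      ring
    · by_cases h1 : a = '>'
      · subst h1
        simp only [if_neg (by decide : ¬ (('>' : Char) = '.')), if_pos rfl, Prod.mk.injEq]
        simp [pvQ2, List.count_cons]
        push_cast
        ring
      · simp only [if_neg h2, if_neg h1, Prod.mk.injEq]
        simp [pvQ2, List.count_cons, h1, h2]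

-- ===== VERDICT (by name: the statement is the Claim_ definition above) =====
theorem count_photos_spec : Claim_equal_count_photos := by
  intro road _
  unfold Spec_count_photos count_photos count_photos_alt
  simp only [List.foldl_reverse, pvB1_fold, pvB2_fold]
  rw [pvA_fold]
  ring
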